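-- pv_equiv track=rewrite | github.com/larshum/rtppl-experiments | scripts/plot-collected.py | wcet_per_particle_count
-- ===== SOURCE A (Python) =====
-- def wcet_per_particle_count(obs):
--     wcet = {}
--     for o in obs:
--         exec_time = o[0]
--         p = o[1]
--         if p in wcet:
--             if exec_time > wcet[p]:
--                 wcet[p] = exec_time
--         else:
--             wcet[p] = exec_time
--     return wcet
-- ===== SOURCE B (Python) =====
-- def wcet_per_particle_count(obs):
--     groups = {}
--     for o in obs:
--         groups.setdefault(o[1], []).append(o[0])
--     return {p: max(times) for p, times in groups.items()}
-- ===== Notes on version B (the rewrite author's own statement) =====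
-- stated objective: simpler
-- what changed: B separates concerns: one pass groups execution times into lists keyed by particle count, then a comprehension takes max of each group, instead of A's inline running-maximum with a membership test and comparison per row.
import Mathlib
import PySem

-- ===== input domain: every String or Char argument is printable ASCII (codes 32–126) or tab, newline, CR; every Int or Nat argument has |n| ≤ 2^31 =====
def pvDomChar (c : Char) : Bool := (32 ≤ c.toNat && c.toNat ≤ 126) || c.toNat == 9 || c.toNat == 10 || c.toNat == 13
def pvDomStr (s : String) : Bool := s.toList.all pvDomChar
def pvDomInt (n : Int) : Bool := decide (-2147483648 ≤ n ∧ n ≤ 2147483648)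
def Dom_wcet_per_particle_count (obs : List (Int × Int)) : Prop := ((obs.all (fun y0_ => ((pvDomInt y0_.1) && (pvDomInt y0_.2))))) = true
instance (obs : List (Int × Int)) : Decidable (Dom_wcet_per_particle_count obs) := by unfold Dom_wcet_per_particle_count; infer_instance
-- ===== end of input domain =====

-- B groups exec times per particle count in one pass, then takes max of each group,
-- instead of A's inline running maximum; objective: simpler decomposition, same cost.

-- ===== PORT A =====
def wcet_per_particle_count (obs : List (Int × Int)) : List (Int × Int) :=
  (obs.foldl (fun wcet o =>
    let exec_time := o.1
    let p := o.2
    if wcet.contains p then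
      if exec_time > (wcet.get? p).getD 0 then wcet.insert p exec_time else wcet
    else
      wcet.insert p exec_time) (PySem.Dict.empty : PySem.Dict Int Int)).items

-- ===== PORT B =====
def wcet_per_particle_count_alt (obs : List (Int × Int)) : List (Int × Int) :=
  let groups := obs.foldl (fun g o => g.modify o.2 [] (· ++ [o.1]))
    (PySem.Dict.empty : PySem.Dict Int (List Int))
  groups.items.map (fun pt => (pt.1, (PySem.List.max? pt.2 (fun y => y)).getD 0))

-- ===== PRECONDITION & SPEC =====
def Spec_wcet_per_particle_count (obs : List (Int × Int)) (out : List (Int × Int)) : Prop := out = wcet_per_particle_count_alt obs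
instance (obs : List (Int × Int)) (out : List (Int × Int)) : Decidable (Spec_wcet_per_particle_count obs out) := by unfold Spec_wcet_per_particle_count; infer_instance

-- ===== CLAIM (what is proved, stated in full; the proofs are below) =====
def Claim_equal_wcet_per_particle_count : Prop := ∀ (obs : List (Int × Int)), Dom_wcet_per_particle_count obs → Spec_wcet_per_particle_count obs (wcet_per_particle_count obs)

-- ===== LEMMAS AND PROOFS =====

-- A's loop body
def pvStepA (d : PySem.Dict Int Int) (o : Int × Int) : PySem.Dict Int Int :=
  if d.contains o.2 then
    if o.1 > (d.get? o.2).getD 0 then d.insert o.2 o.1 else d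
  else
    d.insert o.2 o.1

-- running-max combine on an optional accumulator
def pvComb (a : Option Int) (t : Int) : Option Int :=
  match a with
  | none => some t
  | some v => some (if t > v then t else v)

theorem pvStepA_get? (d : PySem.Dict Int Int) (o : Int × Int) (k : Int) :
    (pvStepA d o).get? k = if o.2 = k then pvComb (d.get? k) o.1 else d.get? k := by
  unfold pvStepA
  cases hc : d.contains o.2 with
  | true =>
    simp only [if_true]
    by_cases hk : o.2 = k
    · subst hk
      rcases hsome : d.get? o.2 with _ | v
      · rw [PySem.Dict.get?_eq_none_iff_contains, hc] at hsome
        cases hsome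
      · simp only [Option.getD_some, pvComb]
        split_ifs with hgt
        · simp [PySem.Dict.get?_insert_self]
        · simp [hsome]
    · simp only [if_neg hk]
      split_ifs with hgt
      · exact PySem.Dict.get?_insert_of_ne d o.1 (fun h => hk h.symm)
      · rfl
  | false =>
    simp only [Bool.false_eq_true, if_false]
    by_cases hk : o.2 = k
    · subst hk
      have hn : d.get? o.2 = none := (PySem.Dict.get?_eq_none_iff_contains d o.2).mpr hc
      simp [PySem.Dict.get?_insert_self, hn, pvComb]
    · simp only [if_neg hk]
      exact PySem.Dict.get?_insert_of_ne d o.1 (fun h => hk h.symm)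

theorem pvFoldA_get? (obs : List (Int × Int)) (d : PySem.Dict Int Int) (k : Int) :
    (obs.foldl pvStepA d).get? k =
      ((obs.filter (fun o => o.2 == k)).map (·.1)).foldl pvComb (d.get? k) := by
  induction obs generalizing d with
  | nil => rfl
  | cons o t ih =>
    simp only [List.foldl_cons, ih, List.filter_cons]
    by_cases hk : o.2 = k
    · simp [hk, pvStepA_get?]
    · simp [hk, pvStepA_get?]

theorem pvStepA_keys (d : PySem.Dict Int Int) (o : Int × Int) :
    (pvStepA d o).keys = PySem.Set.add d.keys o.2 := by
  unfold pvStepA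
  cases hc : d.contains o.2 with
  | true =>
    have hm : o.2 ∈ d.keys := (PySem.Dict.contains_iff_mem_keys d o.2).mp hc
    rw [PySem.Set.add_of_mem hm]
    simp only [if_true]
    split_ifs with hgt
    · exact PySem.Dict.keys_insert_of_contains d o.1 hc
    · rfl
  | false =>
    have hm : o.2 ∉ d.keys := fun h => by
      rw [(PySem.Dict.contains_iff_mem_keys d o.2).mpr h] at hc; cases hc
    rw [PySem.Set.add_of_not_mem hm]
    simp only [Bool.false_eq_true, if_false]
    exact PySem.Dict.keys_insert_of_not_contains d o.1 hc

theorem pvFoldA_keys (obs : List (Int × Int)) (d : PySem.Dict Int Int) :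
    (obs.foldl pvStepA d).keys = PySem.Set.update d.keys (obs.map (·.2)) := by
  induction obs generalizing d with
  | nil => rfl
  | cons o t ih =>
    simp only [List.foldl_cons, List.map_cons, PySem.Set.update_cons, ih, pvStepA_keys]

theorem pvFoldA_nodup (obs : List (Int × Int)) (d : PySem.Dict Int Int)
    (h : d.keys.Nodup) : (obs.foldl pvStepA d).keys.Nodup := by
  induction obs generalizing d with
  | nil => exact h
  | cons o t ih =>
    rw [List.foldl_cons]
    refine ih _ ?_
    unfold pvStepA
    split_ifs <;> first | exact PySem.Dict.nodup_keys_insert _ _ _ h | exact h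

theorem pvComb_fold_cons (x : Int) (l : List Int) :
    l.foldl pvComb (some x) = some (l.foldl (fun a b => max a b) x) := by
  induction l generalizing x with
  | nil => rfl
  | cons y t ih =>
    simp only [List.foldl_cons, pvComb, ih]
    congr 1
    rcases lt_or_ge x y with h | h
    · simp [h, max_eq_right h.le]
    · simp [not_lt.mpr h, max_eq_left h]

-- ===== VERDICT (by name: the statement is the Claim_ definition above) =====
theorem wcet_per_particle_count_spec : Claim_equal_wcet_per_particle_count := by
  intro obs _
  unfold Spec_wcet_per_particle_count wcet_per_particle_count wcet_per_particle_count_alt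
  have hA : (fun (wcet : PySem.Dict Int Int) (o : Int × Int) =>
      let exec_time := o.1
      let p := o.2
      if wcet.contains p then
        if exec_time > (wcet.get? p).getD 0 then wcet.insert p exec_time else wcet
      else wcet.insert p exec_time) = pvStepA := rfl
  rw [hA]
  dsimp only
  set dA := obs.foldl pvStepA PySem.Dict.empty with hdA
  set dB := obs.foldl (fun g o => g.modify o.2 [] (· ++ [o.1]))
      (PySem.Dict.empty : PySem.Dict Int (List Int)) with hdB
  have hkA : dA.keys = PySem.Set.ofList (obs.map (·.2)) := by
    rw [hdA, pvFoldA_keys]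
    simp [PySem.Set.update_nil_left]
  have hndA : dA.keys.Nodup := pvFoldA_nodup obs _ (by simp)
  have hkB : dB.keys = PySem.Set.ofList (obs.map (·.2)) := by
    rw [hdB, PySem.Dict.keys_foldl_modify_key]
    simp [PySem.Set.update_nil_left]
  have hndB : dB.keys.Nodup := by
    rw [hkB]; exact PySem.Set.nodup_ofList _
  have hgB : ∀ k, dB.getD k [] = (obs.filter (fun o => o.2 == k)).map (·.1) := by
    intro k
    have hswap : dB = (obs.map (fun o => (o.2, o.1))).foldl
        (fun d p => d.modify p.1 [] (· ++ [p.2])) PySem.Dict.empty := by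
      rw [hdB, List.foldl_map]
    rw [hswap, PySem.Dict.getD_foldl_modify_append]
    simp [List.filter_map, List.map_map, Function.comp_def]
  rw [PySem.Dict.items_eq_map_keys dA hndA 0, PySem.Dict.items_eq_map_keys dB hndB []]
  rw [hkA, hkB, List.map_map]
  apply List.map_congr_left
  intro k hk
  have hne : (obs.filter (fun o => o.2 == k)).map (·.1) ≠ [] := by
    rw [PySem.Set.mem_ofList] at hk
    rcases List.mem_map.mp hk with ⟨o, ho, hok⟩
    simp only [ne_eq, List.map_eq_nil_iff, List.filter_eq_nil_iff]
    intro h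
    exact h o ho (by simp [hok])
  rcases hl : (obs.filter (fun o => o.2 == k)).map (·.1) with _ | ⟨x, t⟩
  · exact absurd hl hne
  · have hAk : dA.get? k = some (t.foldl (fun a b => max a b) x) := by
      rw [hdA, pvFoldA_get?, hl]
      simp [PySem.Dict.get?_empty, pvComb, pvComb_fold_cons]
    have hgBk : dB.getD k [] = x :: t := by rw [hgB, hl]
    simp only [Function.comp_def, Prod.mk.injEq, true_and]
    rw [hgBk, PySem.List.max?_id_cons, PySem.Dict.getD_eq_get?_getD, hAk]
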